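-- pv_equiv track=rewrite | github.com/lexabr/Slack-open-data-science-search-system | src/search_index/query_processing.py | tokenized_query_to_poliz
-- ===== SOURCE A (Python) =====
-- from typing import List, Dict, Set
--
-- def tokenized_query_to_poliz(tokens: List[str]) -> List[str]:
--     """Transform tokenized query into a reverse polish notation.
--
--     :param tokens: query tokens
--     """
--     priors = {
--         '|': 0,
--         '&': 1,
--         '!': 2
--     }
--
--     tokens = list(reversed(tokens))
--
--     def to_poliz(tokens, prev_prior):
--         res = list()
--
--         while len(tokens) > 0:
--             tok = tokens.pop()
--
--             if tok == '(':
--                 bracket_expr = to_poliz(tokens, 0)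
--                 tok = tokens.pop()
--                 if tok != ')':
--                     raise ValueError("Must be ')'")
--                 res += bracket_expr
--                 continue
--             if tok == ')':
--                 tokens.append(')')
--                 break
--
--             if tok in priors:
--                 if priors[tok] < prev_prior:
--                     tokens.append(tok)
--                     break
--
--                 right = to_poliz(tokens, priors[tok])
--                 res += right + [tok]
--
--             else:
--                 res.append(tok)
--         return res
--
--     return to_poliz(tokens, 0)
-- ===== SOURCE B (Python) =====
-- def tokenized_query_to_poliz(tokens):
--     """Transform tokenized query into a reverse polish notation.
--
--     Shunting-yard: one left-to-right pass with an explicit operator stack.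
--     Operators are right-associative, so only strictly higher precedence is
--     popped.  An unmatched ')' stops parsing (the remaining tokens are
--     discarded, as in the recursive-descent original); a leftover '(' at the
--     end is skipped when flushing (the original raises IndexError there).
--     """
--     prec = {'|': 0, '&': 1, '!': 2}
--     out = []
--     ops = []
--     for tok in tokens:
--         if tok == '(':
--             ops.append(tok)
--         elif tok == ')':
--             while ops and ops[-1] != '(':
--                 out.append(ops.pop())
--             if ops:
--                 ops.pop()          # discard the matching '('
--             else:
--                 return out         # unmatched ')': stop here
--         elif tok in prec:
--             while ops and ops[-1] != '(' and prec[ops[-1]] > prec[tok]: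
--                 out.append(ops.pop())
--             ops.append(tok)
--         else:
--             out.append(tok)
--     while ops:
--         t = ops.pop()
--         if t != '(':
--             out.append(t)
--     return out
-- ===== Notes on version B (the rewrite author's own statement) =====
-- stated objective: idiomatic
-- what changed: Replaced the recursive-descent precedence climber (which pops from a reversed token list and recurses for every operator's right operand) by the standard iterative shunting-yard algorithm: one left-to-right pass with an explicit operator stack, popping only strictly-higher-precedence operators (the operators are right-associative).
import Mathlib
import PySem

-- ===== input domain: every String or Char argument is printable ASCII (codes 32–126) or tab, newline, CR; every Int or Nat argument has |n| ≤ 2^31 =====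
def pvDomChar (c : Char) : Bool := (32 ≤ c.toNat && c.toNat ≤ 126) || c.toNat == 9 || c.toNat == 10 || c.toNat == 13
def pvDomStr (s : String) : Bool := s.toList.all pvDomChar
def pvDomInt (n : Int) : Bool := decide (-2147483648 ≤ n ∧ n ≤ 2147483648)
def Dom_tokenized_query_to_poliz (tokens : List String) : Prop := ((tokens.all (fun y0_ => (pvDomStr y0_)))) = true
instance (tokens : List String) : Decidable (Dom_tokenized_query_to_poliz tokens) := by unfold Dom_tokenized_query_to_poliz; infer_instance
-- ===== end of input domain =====

-- B replaces A's recursive-descent parser by a single-pass shunting-yard loop with an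
-- explicit operator stack (idiomatic; same behaviour on every input where A returns).

-- ===== PORT A =====
-- the `priors` dict: associates each operator with its precedence
def priors (t : String) : Option Int :=
  if t = "|" then some 0 else if t = "&" then some 1 else if t = "!" then some 2 else none

-- Literal port of A's inner `to_poliz(tokens, prev_prior)`.
-- Python reverses `tokens` and pops from the END, i.e. it consumes the ORIGINAL list
-- front to back; we therefore recurse on the head of the un-reversed list.
-- The while loop is the tail recursion accumulating `res` at the front; `none` marks
-- the inputs where Python raises (IndexError on `tokens.pop()` of an empty list,
-- ValueError on a non-')' after a bracket expression).  Result: (res, remaining tokens).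
-- `fuel` only bounds the recursion depth; every recursive call consumes at least one
-- token, so depth ≤ length + 1 and the initial fuel `tokens.length + 1` is never
-- exhausted (lemma `toP_ne_none_of_bal` below covers all inputs admitted by Pre_).
def toP : Nat → List String → Int → Option (List String × List String)
  | 0, _, _ => none
  | f + 1, tokens, prev =>
    match tokens with
    | [] => some ([], [])                     -- while-condition fails: return res
    | tok :: rest =>
      if tok = "(" then
        match toP f rest 0 with               -- bracket_expr = to_poliz(tokens, 0)
        | none => none
        | some (expr, rest') =>
          match rest' with
          | [] => none                        -- tok = tokens.pop() : IndexError
          | tok2 :: rest'' =>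
            if tok2 = ")" then
              match toP f rest'' prev with    -- res += bracket_expr; continue
              | none => none
              | some (res, r) => some (expr ++ res, r)
            else none                         -- raise ValueError("Must be ')'")
      else if tok = ")" then some ([], tok :: rest)   -- tokens.append(')'); break
      else
        match priors tok with
        | some p =>
          if p < prev then some ([], tok :: rest)     -- tokens.append(tok); break
          else
            match toP f rest p with                   -- right = to_poliz(tokens, priors[tok])
            | none => none
            | some (right, rest') =>
              match toP f rest' prev with             -- res += right + [tok]; continue loop
              | none => none
              | some (res2, r) => some (right ++ [tok] ++ res2, r)
        | none =>
          match toP f rest prev with                  -- res.append(tok); continue loop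
          | none => none
          | some (res, r) => some (tok :: res, r)

def tokenized_query_to_poliz (tokens : List String) : List String :=
  match toP (tokens.length + 1) tokens 0 with
  | some (res, _) => res
  | none => []        -- unreachable under Pre_ (Python raises there)

-- ===== PORT B =====
-- prec[o] for an operator known to be on the stack (only '|','&','!','(' are ever pushed)
def precGet (o : String) : Int := (priors o).getD 0

-- `while ops and ops[-1] != '(': out.append(ops.pop())` → (popped prefix, rest of stack)
def popUntilParen : List String → List String × List String
  | [] => ([], [])
  | o :: r =>
    if o = "(" then ([], o :: r)
    else match popUntilParen r with
         | (pop, r') => (o :: pop, r')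

-- `while ops and ops[-1] != '(' and prec[ops[-1]] > prec[tok]: out.append(ops.pop())`
def popHigher (p : Int) : List String → List String × List String
  | [] => ([], [])
  | o :: r =>
    if o ≠ "(" ∧ precGet o > p then
      match popHigher p r with
      | (pop, r') => (o :: pop, r')
    else ([], o :: r)

-- final `while ops: t = ops.pop(); if t != '(': out.append(t)`
def syFlush (out ops : List String) : List String :=
  match ops with
  | [] => out
  | o :: r => if o = "(" then syFlush out r else syFlush (out ++ [o]) r

-- the main `for tok in tokens` loop, state = (out, ops)
def syLoop (toks out ops : List String) : List String :=
  match toks with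
  | [] => syFlush out ops
  | t :: r =>
    if t = "(" then syLoop r out (t :: ops)
    else if t = ")" then
      match popUntilParen ops with
      | (pop, _ :: ops'') => syLoop r (out ++ pop) ops''   -- `if ops: ops.pop()` drops the '('
      | (pop, []) => out ++ pop                            -- unmatched ')': `return out`
    else
      match priors t with
      | some p =>
        match popHigher p ops with
        | (pop, ops') => syLoop r (out ++ pop) (t :: ops')
      | none => syLoop r (out ++ [t]) ops

def tokenized_query_to_poliz_alt (tokens : List String) : List String :=
  syLoop tokens [] []

-- ===== PRECONDITION & SPEC =====
-- Saturating parenthesis balance: '(' adds 1, ')' subtracts 1, and the scan freezes as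
-- soon as the balance goes negative (an unmatched ')' makes A stop parsing there).
def sb (b : Int) : List String → Int
  | [] => b
  | t :: r =>
    let b' := b + (if t = "(" then 1 else if t = ")" then -1 else 0)
    if b' < 0 then b' else sb b' r

-- Pre_ excludes exactly the inputs where A raises IndexError: a '(' that is still
-- unmatched when the tokens end (positive saturating balance).  A returns on all others.
def Pre_tokenized_query_to_poliz (tokens : List String) : Prop := sb 0 tokens ≤ 0
instance (tokens : List String) : Decidable (Pre_tokenized_query_to_poliz tokens) := by
  unfold Pre_tokenized_query_to_poliz; infer_instance

def pvWitness_tokenized_query_to_poliz : List String := ["a", "&", "(", "b", "|", "!", "c", ")"]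

def Spec_tokenized_query_to_poliz (tokens : List String) (out : List String) : Prop := out = tokenized_query_to_poliz_alt tokens
instance (tokens : List String) (out : List String) : Decidable (Spec_tokenized_query_to_poliz tokens out) := by unfold Spec_tokenized_query_to_poliz; infer_instance

-- ===== CLAIM (what is proved, stated in full; the proofs are below) =====
def Claim_equal_tokenized_query_to_poliz : Prop := ∀ (tokens : List String), Dom_tokenized_query_to_poliz tokens → Pre_tokenized_query_to_poliz tokens → Spec_tokenized_query_to_poliz tokens (tokenized_query_to_poliz tokens)

-- ===== LEMMAS AND PROOFS =====

theorem priors_nonneg {u : String} {p : Int} (h : priors u = some p) : 0 ≤ p := by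
  unfold priors at h
  split_ifs at h <;> simp only [Option.some.injEq] at h <;> omega

theorem priors_ne_lparen {u : String} {p : Int} (h : priors u = some p) : u ≠ "(" := by
  intro e; subst e; simp [priors] at h

theorem priors_ne_rparen {u : String} {p : Int} (h : priors u = some p) : u ≠ ")" := by
  intro e; subst e; simp [priors] at h

-- Pure (accumulator-free) version of syLoop used by the proofs.
def syP : List String → List String → List String
  | [], ops => syFlush [] ops
  | t :: r, ops =>
    if t = "(" then syP r (t :: ops)
    else if t = ")" then
      match popUntilParen ops with
      | (pop, _ :: ops'') => pop ++ syP r ops''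
      | (pop, []) => pop
    else
      match priors t with
      | some p =>
        match popHigher p ops with
        | (pop, ops') => pop ++ syP r (t :: ops')
      | none => t :: syP r ops

theorem syFlush_acc (ops : List String) : ∀ out, syFlush out ops = out ++ syFlush [] ops := by
  induction ops with
  | nil => intro out; simp only [syFlush, List.append_nil]
  | cons o r ih =>
    intro out
    by_cases h : o = "("
    · simp only [syFlush, if_pos h]; exact ih out
    · simp only [syFlush, if_neg h, List.nil_append]
      rw [ih (out ++ [o]), ih [o]]
      simp [List.append_assoc]

theorem syLoop_acc (toks : List String) : ∀ out ops, syLoop toks out ops = out ++ syP toks ops := by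
  induction toks with
  | nil => intro out ops; simp only [syLoop, syP]; exact syFlush_acc ops out
  | cons t r ih =>
    intro out ops
    by_cases h1 : t = "("
    · simp only [syLoop, syP, if_pos h1]; exact ih out (t :: ops)
    · by_cases h2 : t = ")"
      · simp only [syLoop, syP, if_neg h1, if_pos h2]
        rcases hp : popUntilParen ops with ⟨pop, ops'⟩
        cases ops' with
        | nil => simp
        | cons o rest => simp [ih, List.append_assoc]
      · simp only [syLoop, syP, if_neg h1, if_neg h2]
        cases hp : priors t with
        | none => simp [ih]
        | some p =>
          rcases hh : popHigher p ops with ⟨pop, ops'⟩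
          simp [hh, ih, List.append_assoc]

-- The pending-operator stack above its first '(' only holds operators of precedence ≤ prev.
def OpsLE (prev : Int) : List String → Prop
  | [] => True
  | o :: r => o = "(" ∨ ((∃ p, priors o = some p ∧ p ≤ prev) ∧ OpsLE prev r)

theorem OpsLE_mono {prev p : Int} : ∀ {ops : List String}, OpsLE prev ops → prev ≤ p → OpsLE p ops := by
  intro ops
  induction ops with
  | nil => intro _ _; trivial
  | cons o r ih =>
    intro h hle
    rcases h with h | ⟨⟨q, hq, hqle⟩, hr⟩
    · exact Or.inl h
    · exact Or.inr ⟨⟨q, hq, le_trans hqle hle⟩, ih hr hle⟩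

-- the remaining tokens returned by to_poliz form a suffix-length bound
theorem toP_len : ∀ f (tokens : List String) prev res rest,
    toP f tokens prev = some (res, rest) → rest.length ≤ tokens.length := by
  intro f
  induction f with
  | zero => intro tokens prev res rest h; simp [toP] at h
  | succ f ih =>
    intro tokens prev res rest h
    cases tokens with
    | nil =>
      simp only [toP, Option.some.injEq, Prod.mk.injEq] at h
      obtain ⟨-, h2⟩ := h; subst h2; simp
    | cons tok r =>
      simp only [toP] at h
      by_cases h1 : tok = "("
      · rcases hin : toP f r 0 with - | ⟨expr, rest'⟩
        · simp [h1, hin] at h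
        · cases rest' with
          | nil => simp [h1, hin] at h
          | cons tok2 rest'' =>
            by_cases h3 : tok2 = ")"
            · rcases hcont : toP f rest'' prev with - | ⟨res2, r2⟩
              · simp [h1, hin, h3, hcont] at h
              · simp [h1, hin, h3, hcont] at h
                obtain ⟨-, hrest⟩ := h; subst hrest
                have l1 := ih r 0 expr (tok2 :: rest'') hin
                have l2 := ih _ _ _ _ hcont
                simp at l1 ⊢; omega
            · simp [h1, hin, h3] at h
      · by_cases h2 : tok = ")"
        · simp [h2] at h
          obtain ⟨-, hrest⟩ := h; subst hrest; simp
        · rcases hp : priors tok with - | p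
          · rcases hcont : toP f r prev with - | ⟨res2, r2⟩
            · simp [h1, h2, hp, hcont] at h
            · simp [h1, h2, hp, hcont] at h
              obtain ⟨-, hrest⟩ := h; subst hrest
              have l2 := ih _ _ _ _ hcont
              simp; omega
          · by_cases h4 : p < prev
            · simp [h1, h2, hp, h4] at h
              obtain ⟨-, hrest⟩ := h; subst hrest; simp
            · rcases hr : toP f r p with - | ⟨right, rest'⟩
              · simp [h1, h2, hp, h4, hr] at h
              · rcases hcont : toP f rest' prev with - | ⟨res2, r2⟩
                · simp [h1, h2, hp, h4, hr, hcont] at h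
                · simp [h1, h2, hp, h4, hr, hcont] at h
                  obtain ⟨-, hrest⟩ := h; subst hrest
                  have l1 := ih r p right rest' hr
                  have l2 := ih _ _ _ _ hcont
                  simp; omega

-- shape of the remaining tokens: empty, a ')', or an operator of lower precedence
theorem toP_rest_shape : ∀ f (tokens : List String) prev res rest,
    toP f tokens prev = some (res, rest) →
    rest = [] ∨ (∃ r, rest = ")" :: r) ∨ (∃ u pu r, rest = u :: r ∧ priors u = some pu ∧ pu < prev) := by
  intro f
  induction f with
  | zero => intro tokens prev res rest h; simp [toP] at h
  | succ f ih =>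
    intro tokens prev res rest h
    cases tokens with
    | nil =>
      simp only [toP, Option.some.injEq, Prod.mk.injEq] at h
      obtain ⟨-, h2⟩ := h; subst h2; exact Or.inl rfl
    | cons tok r =>
      simp only [toP] at h
      by_cases h1 : tok = "("
      · rcases hin : toP f r 0 with - | ⟨expr, rest'⟩
        · simp [h1, hin] at h
        · cases rest' with
          | nil => simp [h1, hin] at h
          | cons tok2 rest'' =>
            by_cases h3 : tok2 = ")"
            · rcases hcont : toP f rest'' prev with - | ⟨res2, r2⟩
              · simp [h1, hin, h3, hcont] at h
              · simp [h1, hin, h3, hcont] at h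
                obtain ⟨-, hrest⟩ := h; subst hrest
                exact ih _ _ _ _ hcont
            · simp [h1, hin, h3] at h
      · by_cases h2 : tok = ")"
        · simp [h2] at h
          obtain ⟨-, hrest⟩ := h; subst hrest
          exact Or.inr (Or.inl ⟨r, rfl⟩)
        · rcases hp : priors tok with - | p
          · rcases hcont : toP f r prev with - | ⟨res2, r2⟩
            · simp [h1, h2, hp, hcont] at h
            · simp [h1, h2, hp, hcont] at h
              obtain ⟨-, hrest⟩ := h; subst hrest
              exact ih _ _ _ _ hcont
          · by_cases h4 : p < prev
            · simp [h1, h2, hp, h4] at h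
              obtain ⟨-, hrest⟩ := h; subst hrest
              exact Or.inr (Or.inr ⟨tok, p, r, rfl, hp, h4⟩)
            · rcases hr : toP f r p with - | ⟨right, rest'⟩
              · simp [h1, h2, hp, h4, hr] at h
              · rcases hcont : toP f rest' prev with - | ⟨res2, r2⟩
                · simp [h1, h2, hp, h4, hr, hcont] at h
                · simp [h1, h2, hp, h4, hr, hcont] at h
                  obtain ⟨-, hrest⟩ := h; subst hrest
                  exact ih _ _ _ _ hcont

-- single-step facts about the saturating balance
theorem sb_lparen {b : Int} (r : List String) (h : 0 ≤ b) : sb b ("(" :: r) = sb (b+1) r := by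
  simp only [sb]; rw [if_neg (by simp; omega)]; simp

theorem sb_rparen {b : Int} (r : List String) (h : 0 < b) : sb b (")" :: r) = sb (b-1) r := by
  simp only [sb]; rw [if_neg (by simp; omega)]
  have e : b + -1 = b - 1 := by omega
  simp [e]

theorem sb_other {b : Int} {t : String} (r : List String) (h1 : t ≠ "(") (h2 : t ≠ ")")
    (h : 0 ≤ b) : sb b (t :: r) = sb b r := by
  simp only [sb, if_neg h1, if_neg h2]
  rw [if_neg (by omega)]; simp

-- to_poliz consumes a balanced, never-negative prefix
theorem toP_bal : ∀ f (tokens : List String) prev res rest (b : Int),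
    toP f tokens prev = some (res, rest) → 0 ≤ b → sb b tokens = sb b rest := by
  intro f
  induction f with
  | zero => intro tokens prev res rest b h; simp [toP] at h
  | succ f ih =>
    intro tokens prev res rest b h hb
    cases tokens with
    | nil =>
      simp only [toP, Option.some.injEq, Prod.mk.injEq] at h
      obtain ⟨-, h2⟩ := h; subst h2; rfl
    | cons tok r =>
      simp only [toP] at h
      by_cases h1 : tok = "("
      · rcases hin : toP f r 0 with - | ⟨expr, rest'⟩
        · simp [h1, hin] at h
        · cases rest' with
          | nil => simp [h1, hin] at h
          | cons tok2 rest'' =>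
            by_cases h3 : tok2 = ")"
            · rcases hcont : toP f rest'' prev with - | ⟨res2, r2⟩
              · simp [h1, hin, h3, hcont] at h
              · simp [h1, hin, h3, hcont] at h
                obtain ⟨-, hrest⟩ := h; subst hrest; subst h1; subst h3
                rw [sb_lparen r hb]
                rw [ih _ _ _ _ (b+1) hin (by omega)]
                rw [sb_rparen rest'' (by omega)]
                have e : b + 1 - 1 = b := by omega
                rw [e]
                exact ih _ _ _ _ b hcont hb
            · simp [h1, hin, h3] at h
      · by_cases h2 : tok = ")"
        · simp [h2] at h
          obtain ⟨-, hrest⟩ := h; subst hrest; rw [h2]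
        · rcases hp : priors tok with - | p
          · rcases hcont : toP f r prev with - | ⟨res2, r2⟩
            · simp [h1, h2, hp, hcont] at h
            · simp [h1, h2, hp, hcont] at h
              obtain ⟨-, hrest⟩ := h; subst hrest
              rw [sb_other r h1 h2 hb]
              exact ih _ _ _ _ b hcont hb
          · by_cases h4 : p < prev
            · simp [h1, h2, hp, h4] at h
              obtain ⟨-, hrest⟩ := h; subst hrest; rfl
            · rcases hr : toP f r p with - | ⟨right, rest'⟩
              · simp [h1, h2, hp, h4, hr] at h
              · rcases hcont : toP f rest' prev with - | ⟨res2, r2⟩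
                · simp [h1, h2, hp, h4, hr, hcont] at h
                · simp [h1, h2, hp, h4, hr, hcont] at h
                  obtain ⟨-, hrest⟩ := h; subst hrest
                  rw [sb_other r h1 h2 hb]
                  rw [ih _ _ _ _ b hr hb]
                  exact ih _ _ _ _ b hcont hb

theorem sb_shift : ∀ (r : List String) (b₁ b₂ : Int), 0 ≤ b₁ → b₁ ≤ b₂ → 0 < sb b₁ r →
    sb b₂ r = b₂ - b₁ + sb b₁ r := by
  intro r
  induction r with
  | nil => intro b₁ b₂ _ _ _; simp only [sb]; ring
  | cons t r ih =>
    intro b₁ b₂ h0 hle hpos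
    by_cases h1 : t = "("
    · subst h1
      rw [sb_lparen r h0] at hpos ⊢
      rw [sb_lparen r (by omega)]
      rw [ih (b₁+1) (b₂+1) (by omega) (by omega) hpos]
      ring
    · by_cases h2 : t = ")"
      · subst h2
        rcases eq_or_lt_of_le h0 with h0' | h0'
        · exfalso
          rw [← h0'] at hpos
          simp [sb] at hpos
        · rw [sb_rparen r h0'] at hpos ⊢
          rw [sb_rparen r (by omega)]
          rw [ih (b₁-1) (b₂-1) (by omega) (by omega) hpos]
          ring
      · rw [sb_other r h1 h2 h0] at hpos ⊢
        rw [sb_other r h1 h2 (by omega)]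
        exact ih b₁ b₂ h0 hle hpos

-- where the Python raises, the saturating balance is positive
theorem toP_none_bal : ∀ f (tokens : List String) prev, tokens.length < f →
    toP f tokens prev = none → 0 < sb 0 tokens := by
  intro f
  induction f with
  | zero => intro tokens prev hlen h; exact absurd hlen (Nat.not_lt_zero _)
  | succ f ih =>
    intro tokens prev hlen h
    cases tokens with
    | nil => simp [toP] at h
    | cons tok r =>
      have hr' : r.length < f := by simp at hlen; omega
      simp only [toP] at h
      by_cases h1 : tok = "("
      · subst h1
        rw [sb_lparen r (by omega), show (0:Int)+1 = 1 from by norm_num]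
        rcases hin : toP f r 0 with - | ⟨expr, rest'⟩
        · have := ih r 0 hr' hin
          have := sb_shift r 0 1 (by omega) (by omega) this
          omega
        · cases rest' with
          | nil =>
            have := toP_bal f r 0 expr [] 1 hin (by omega)
            simp only [sb] at this
            omega
          | cons tok2 rest'' =>
            by_cases h3 : tok2 = ")"
            · subst h3
              rcases hcont : toP f rest'' prev with - | ⟨res2, r2⟩
              · have hlen2 : rest''.length < f := by
                  have := toP_len f r 0 expr _ hin; simp at this; omega
                have hpos := ih rest'' prev hlen2 hcont
                have hb := toP_bal f r 0 expr _ 1 hin (by omega)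
                rw [hb, sb_rparen rest'' (by omega)]
                simpa using hpos
              · simp [hin, hcont] at h
            · exfalso
              rcases toP_rest_shape f r 0 expr _ hin with hsh | ⟨r', hsh⟩ | ⟨u, pu, r', hsh, hpu, hlt⟩
              · simp at hsh
              · exact h3 (List.head_eq_of_cons_eq hsh)
              · have := priors_nonneg hpu
                have : u = tok2 := (List.head_eq_of_cons_eq hsh).symm
                omega
      · by_cases h2 : tok = ")"
        · simp [h2] at h
        · rcases hp : priors tok with - | p
          · rcases hcont : toP f r prev with - | ⟨res2, r2⟩
            · rw [sb_other r h1 h2 (by omega)]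
              exact ih r prev hr' hcont
            · simp [h1, h2, hp, hcont] at h
          · by_cases h4 : p < prev
            · simp [h1, h2, hp, h4] at h
            · rw [sb_other r h1 h2 (by omega)]
              rcases hr : toP f r p with - | ⟨right, rest'⟩
              · exact ih r p hr' hr
              · rcases hcont : toP f rest' prev with - | ⟨res2, r2⟩
                · have hlen2 : rest'.length < f := by
                    have := toP_len f r p right rest' hr; omega
                  have hpos := ih rest' prev hlen2 hcont
                  rw [toP_bal f r p right rest' 0 hr (by omega)]
                  exact hpos
                · simp [h1, h2, hp, h4, hr, hcont] at h

theorem popHigher_nil_of_OpsLE {prev p : Int} {ops : List String}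
    (h : OpsLE prev ops) (hle : prev ≤ p) : popHigher p ops = ([], ops) := by
  cases ops with
  | nil => rfl
  | cons o r =>
    rcases h with h | ⟨⟨q, hq, hqle⟩, _⟩
    · simp [popHigher, h]
    · have : precGet o = q := by simp [precGet, hq]
      have : ¬ (o ≠ "(" ∧ precGet o > p) := by
        rintro ⟨_, hgt⟩; rw [this] at hgt; omega
      simp [popHigher, this]

-- pushing an operator above a boundary token commutes with emission
theorem syP_pop_top {t : String} {p : Int} (ht : priors t = some p) :
    ∀ (rest' : List String), (rest' = [] ∨ (∃ r, rest' = ")" :: r) ∨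
      (∃ u pu r, rest' = u :: r ∧ priors u = some pu ∧ pu < p)) →
    ∀ ops, syP rest' (t :: ops) = t :: syP rest' ops := by
  have ht1 : t ≠ "(" := priors_ne_lparen ht
  intro rest' hsh ops
  rcases hsh with rfl | ⟨r, rfl⟩ | ⟨u, pu, r, rfl, hpu, hlt⟩
  · simp only [syP, syFlush, if_neg ht1, List.nil_append]
    rw [syFlush_acc ops [t]]
    rfl
  · simp only [syP]
    rcases hP : popUntilParen ops with ⟨pop0, ops0⟩
    have hP' : popUntilParen (t :: ops) = (t :: pop0, ops0) := by
      simp [popUntilParen, if_neg ht1, hP]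
    cases ops0 with
    | nil => simp [hP']
    | cons o rest0 => simp [hP']
  · have hu1 : u ≠ "(" := priors_ne_lparen hpu
    have hu2 : u ≠ ")" := priors_ne_rparen hpu
    simp only [syP, if_neg hu1, if_neg hu2, hpu]
    rcases hP : popHigher pu ops with ⟨pop0, ops0⟩
    have hcond : t ≠ "(" ∧ precGet t > pu := ⟨ht1, by simp [precGet, ht]; omega⟩
    have hP' : popHigher pu (t :: ops) = (t :: pop0, ops0) := by
      simp only [popHigher, if_pos hcond, hP]
    simp [hP']

-- MAIN LEMMA: a successful to_poliz call corresponds to shunting-yard emitting `res`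
theorem toP_syP : ∀ f (tokens : List String) prev ops res rest, tokens.length < f →
    toP f tokens prev = some (res, rest) → OpsLE prev ops →
    syP tokens ops = res ++ syP rest ops := by
  intro f
  induction f with
  | zero => intro tokens prev ops res rest hlen h; exact absurd hlen (Nat.not_lt_zero _)
  | succ f ih =>
    intro tokens prev ops res rest hlen h hops
    cases tokens with
    | nil =>
      simp only [toP, Option.some.injEq, Prod.mk.injEq] at h
      obtain ⟨hres, hrest⟩ := h; subst hrest; subst hres; simp
    | cons tok r =>
      have hr' : r.length < f := by simp at hlen; omega
      simp only [toP] at h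
      by_cases h1 : tok = "("
      · subst h1
        rcases hin : toP f r 0 with - | ⟨expr, rest'⟩
        · simp [hin] at h
        · cases rest' with
          | nil => simp [hin] at h
          | cons tok2 rest'' =>
            by_cases h3 : tok2 = ")"
            · subst h3
              rcases hcont : toP f rest'' prev with - | ⟨res2, r2⟩
              · simp [hin, hcont] at h
              · simp [hin, hcont] at h
                obtain ⟨hres, hrest⟩ := h; subst hrest; subst hres
                have hlen2 : rest''.length < f := by
                  have := toP_len f r 0 expr _ hin; simp at this; omega
                have IH1 := ih r 0 ("(" :: ops) expr _ hr' hin (Or.inl rfl)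
                have IH2 := ih rest'' prev ops res2 _ hlen2 hcont hops
                simp only [syP]
                rw [IH1]
                have hmid : syP (")" :: rest'') ("(" :: ops) = syP rest'' ops := by
                  simp only [syP]
                  have : popUntilParen ("(" :: ops) = ([], "(" :: ops) := by
                    simp [popUntilParen]
                  rw [this]
                  simp
                rw [hmid, IH2]
                simp
            · simp [hin, h3] at h
      · by_cases h2 : tok = ")"
        · simp [h2] at h
          obtain ⟨hres, hrest⟩ := h; subst hrest; subst hres; simp [h2]
        · rcases hp : priors tok with - | p
          · rcases hcont : toP f r prev with - | ⟨res2, r2⟩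
            · simp [h1, h2, hp, hcont] at h
            · simp [h1, h2, hp, hcont] at h
              obtain ⟨hres, hrest⟩ := h; subst hrest; subst hres
              have IH2 := ih r prev ops res2 _ hr' hcont hops
              simp only [syP, if_neg h1, if_neg h2, hp]
              rw [IH2]
              simp
          · by_cases h4 : p < prev
            · simp [h1, h2, hp, h4] at h
              obtain ⟨hres, hrest⟩ := h; subst hrest; subst hres; simp
            · rcases hr : toP f r p with - | ⟨right, rest'⟩
              · simp [h1, h2, hp, h4, hr] at h
              · rcases hcont : toP f rest' prev with - | ⟨res2, r2⟩
                · simp [h1, h2, hp, h4, hr, hcont] at h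
                · simp [h1, h2, hp, h4, hr, hcont] at h
                  obtain ⟨hres, hrest⟩ := h; subst hrest; subst hres
                  have hple : prev ≤ p := by omega
                  have hlen2 : rest'.length < f := by
                    have := toP_len f r p right rest' hr; omega
                  have hops' : OpsLE p (tok :: ops) :=
                    Or.inr ⟨⟨p, hp, le_refl p⟩, OpsLE_mono hops hple⟩
                  have IH1 := ih r p (tok :: ops) right rest' hr' hr hops'
                  have IH2 := ih rest' prev ops res2 _ hlen2 hcont hops
                  have hPop := popHigher_nil_of_OpsLE hops hple
                  have hTop := syP_pop_top hp rest' (toP_rest_shape f r p right rest' hr) ops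
                  simp only [syP, if_neg h1, if_neg h2, hp, hPop]
                  rw [IH1, hTop, IH2]
                  simp

-- ===== VERDICT (by name: the statement is the Claim_ definition above) =====
theorem tokenized_query_to_poliz_spec : Claim_equal_tokenized_query_to_poliz := by
  intro tokens _dom pre
  unfold Pre_tokenized_query_to_poliz at pre
  unfold Spec_tokenized_query_to_poliz tokenized_query_to_poliz tokenized_query_to_poliz_alt
  rcases h : toP (tokens.length + 1) tokens 0 with - | ⟨res, rest⟩
  · exact absurd (toP_none_bal _ tokens 0 (by omega) h) (by omega)
  · rw [syLoop_acc]
    rw [toP_syP (tokens.length + 1) tokens 0 [] res rest (by omega) h trivial]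
    have hnil : syP rest [] = [] := by
      rcases toP_rest_shape _ _ _ _ _ h with rfl | ⟨r, rfl⟩ | ⟨u, pu, r, rfl, hpu, hlt⟩
      · rfl
      · simp [syP, popUntilParen]
      · exact absurd (priors_nonneg hpu) (by omega)
    rw [hnil]
    simp
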